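-- pv_equiv track=rewrite | github.com/grahambarrgraham/AdventOfCodePython | 2019/day3.py | find_intercepts
-- ===== SOURCE A (Python) =====
-- def in_seq(v, seqs):
--     result = []
--     for a, b in seqs:
--         if a <= v <= b:
--             result.append(v)
--     return result
--
-- def find_intercepts(rows, cols):
--     intercepts = []
--     for y, x_seqs in rows.items():
--         x_s = [x for x in cols.keys() if in_seq(x, x_seqs)]
--         for x in x_s:
--             y_s = in_seq(y, cols[x])
--             intercepts.extend([(x, y) for y in y_s])
--     return intercepts
-- ===== SOURCE B (Python) =====
-- def _bl(xs, v):
--     # index of the first element >= v in sorted xs (recursive binary search)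
--     if not xs:
--         return 0
--     mid = len(xs) // 2
--     if xs[mid] < v:
--         return mid + 1 + _bl(xs[mid + 1:], v)
--     return _bl(xs[:mid], v)
--
--
-- def _br(xs, v):
--     # index just past the last element <= v in sorted xs
--     if not xs:
--         return 0
--     mid = len(xs) // 2
--     if xs[mid] <= v:
--         return mid + 1 + _br(xs[mid + 1:], v)
--     return _br(xs[:mid], v)
--
--
-- def find_intercepts(rows, cols):
--     # Sort the column x-coordinates once; per row interval, binary-search the
--     # hit range, collect original column indices, and emit them in key order.
--     orig = list(cols.items())
--     pairs = sorted(((x, i) for i, (x, _) in enumerate(orig)), key=lambda t: t[0])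
--     xs = [x for x, _ in pairs]
--     out = []
--     for y, x_seqs in rows.items():
--         hit = set()
--         for a, b in x_seqs:
--             for _, i in pairs[_bl(xs, a):_br(xs, b)]:
--                 hit.add(i)
--         for i in sorted(hit):
--             x, y_seqs = orig[i]
--             out += [(x, y)] * sum(1 for a, b in y_seqs if a <= y <= b)
--     return out
-- ===== Notes on version B (the rewrite author's own statement) =====
-- stated objective: faster
-- what changed: B sorts the column keys once and, for each row interval, binary-searches the hit range of columns instead of scanning every column key per row, collecting original column indices in a set and emitting them in sorted (insertion) order.
import Mathlib
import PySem

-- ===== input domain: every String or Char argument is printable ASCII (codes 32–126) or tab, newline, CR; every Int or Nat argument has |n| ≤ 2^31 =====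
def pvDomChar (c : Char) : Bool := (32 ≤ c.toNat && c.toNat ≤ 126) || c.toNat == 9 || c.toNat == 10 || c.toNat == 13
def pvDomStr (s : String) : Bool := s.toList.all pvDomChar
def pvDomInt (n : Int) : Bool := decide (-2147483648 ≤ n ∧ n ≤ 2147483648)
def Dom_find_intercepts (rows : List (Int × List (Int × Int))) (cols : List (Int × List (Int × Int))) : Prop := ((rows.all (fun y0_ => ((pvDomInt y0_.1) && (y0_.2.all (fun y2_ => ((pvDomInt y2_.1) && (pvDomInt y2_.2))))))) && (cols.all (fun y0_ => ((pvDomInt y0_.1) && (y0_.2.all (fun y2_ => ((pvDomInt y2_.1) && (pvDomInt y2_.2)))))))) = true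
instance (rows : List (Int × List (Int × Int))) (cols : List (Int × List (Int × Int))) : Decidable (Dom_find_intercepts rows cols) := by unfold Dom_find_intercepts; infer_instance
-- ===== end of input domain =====

-- B sorts the column keys once and binary-searches the hit range per row interval instead of scanning all columns per row.

-- ===== PORT A =====
-- in_seq: literal port of A's helper
def in_seq (v : Int) (seqs : List (Int × Int)) : List Int :=
  seqs.foldl (fun result p => if p.1 ≤ v ∧ v ≤ p.2 then result ++ [v] else result) []

def find_intercepts (rows : List (Int × List (Int × Int))) (cols : List (Int × List (Int × Int))) : List (Int × Int) :=
  rows.foldl (fun intercepts r =>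
    let y := r.1
    let x_seqs := r.2
    let x_s := (cols.map Prod.fst).filter (fun x => !(in_seq x x_seqs).isEmpty)
    x_s.foldl (fun acc x =>
      -- cols[x]: x is always a key of cols, so the KeyError default [] is never used
      let y_s := in_seq y (((PySem.Dict.mk cols).get? x).getD [])
      acc ++ y_s.map (fun v => (x, v))) intercepts) []

-- ===== PORT B =====
-- _bl: recursive binary search; mid = len(xs)//2 is written inline; xs[:mid] / xs[mid+1:] are
-- take/drop and xs[mid] is getD (exact: the bounds are nonnegative and in range)
def pvBl (xs : List Int) (v : Int) : Nat :=
  if h : xs = [] then 0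
  else if xs.getD (xs.length / 2) 0 < v then
    xs.length / 2 + 1 + pvBl (xs.drop (xs.length / 2 + 1)) v
  else pvBl (xs.take (xs.length / 2)) v
termination_by xs.length
decreasing_by
  · have : xs.length ≠ 0 := fun hn => h (List.eq_nil_of_length_eq_zero hn)
    simp only [List.length_drop]; omega
  · have : xs.length ≠ 0 := fun hn => h (List.eq_nil_of_length_eq_zero hn)
    simp only [List.length_take]; omega

-- _br: same search with <=
def pvBr (xs : List Int) (v : Int) : Nat :=
  if h : xs = [] then 0
  else if xs.getD (xs.length / 2) 0 ≤ v then
    xs.length / 2 + 1 + pvBr (xs.drop (xs.length / 2 + 1)) v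
  else pvBr (xs.take (xs.length / 2))  v
termination_by xs.length
decreasing_by
  · have : xs.length ≠ 0 := fun hn => h (List.eq_nil_of_length_eq_zero hn)
    simp only [List.length_drop]; omega
  · have : xs.length ≠ 0 := fun hn => h (List.eq_nil_of_length_eq_zero hn)
    simp only [List.length_take]; omega

def find_intercepts_alt (rows : List (Int × List (Int × Int))) (cols : List (Int × List (Int × Int))) : List (Int × Int) :=
  let orig := cols
  let pairs := PySem.List.sorted ((PySem.List.enumerate orig).map (fun t => (t.2.1, t.1))) (fun t => t.1)
  let xs := pairs.map (fun t => t.1)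
  rows.foldl (fun out r =>
    let y := r.1
    let x_seqs := r.2
    let hit : PySem.Set Int := x_seqs.foldl (fun hit p =>
      (PySem.List.slice pairs (some ((pvBl xs p.1 : Nat) : Int)) (some ((pvBr xs p.2 : Nat) : Int))).foldl
        (fun hit t => PySem.Set.add hit t.2) hit) PySem.Set.empty
    (PySem.List.sorted hit (fun i => i)).foldl (fun out i =>
      -- orig[i]: i always lies in range, so the default is never used
      let c := PySem.List.pyGetD orig i (0, [])
      out ++ PySem.List.pyRepeat [(c.1, y)]
        (c.2.foldl (fun acc q => if q.1 ≤ y ∧ y ≤ q.2 then acc + 1 else acc) 0)) out) []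

-- ===== PRECONDITION & SPEC =====
-- Pre_ requires distinct keys in both association lists: a Python dict cannot hold
-- duplicate keys (dict construction overwrites), so duplicate-key lists do not
-- represent any input A receives.
def Pre_find_intercepts (rows : List (Int × List (Int × Int))) (cols : List (Int × List (Int × Int))) : Prop :=
  (rows.map Prod.fst).Nodup ∧ (cols.map Prod.fst).Nodup
instance (rows : List (Int × List (Int × Int))) (cols : List (Int × List (Int × Int))) : Decidable (Pre_find_intercepts rows cols) := by unfold Pre_find_intercepts; infer_instance

def pvWitness_find_intercepts : (List (Int × List (Int × Int))) × (List (Int × List (Int × Int))) :=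
  ([(0, [(0, 2)])], [(1, [(-1, 1)])])

def Spec_find_intercepts (rows : List (Int × List (Int × Int))) (cols : List (Int × List (Int × Int))) (out : List (Int × Int)) : Prop := out = find_intercepts_alt rows cols
instance (rows : List (Int × List (Int × Int))) (cols : List (Int × List (Int × Int))) (out : List (Int × Int)) : Decidable (Spec_find_intercepts rows cols out) := by unfold Spec_find_intercepts; infer_instance

-- ===== CLAIM (what is proved, stated in full; the proofs are below) =====
def Claim_equal_find_intercepts : Prop := ∀ (rows : List (Int × List (Int × Int))) (cols : List (Int × List (Int × Int))), Dom_find_intercepts rows cols → Pre_find_intercepts rows cols → Spec_find_intercepts rows cols (find_intercepts rows cols)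

-- ===== LEMMAS AND PROOFS =====

-- the contribution of one column c to the row (y, x_seqs)
def pvContrib (y : Int) (x_seqs : List (Int × Int)) (c : Int × List (Int × Int)) : List (Int × Int) :=
  if x_seqs.any (fun p => decide (p.1 ≤ c.1 ∧ c.1 ≤ p.2))
  then ((c.2.filter (fun p => decide (p.1 ≤ y ∧ y ≤ p.2))).map (fun _ => (c.1, y)))
  else []

theorem in_seq_foldl (v : Int) (seqs : List (Int × Int)) (acc : List Int) :
    seqs.foldl (fun result p => if p.1 ≤ v ∧ v ≤ p.2 then result ++ [v] else result) acc =
      acc ++ (seqs.filter (fun p => decide (p.1 ≤ v ∧ v ≤ p.2))).map (fun _ => v) := by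
  induction seqs generalizing acc with
  | nil => simp
  | cons h t ih =>
    by_cases hp : (h.1 ≤ v ∧ v ≤ h.2)
    · simp [hp, ih]
    · simp [hp, ih]

theorem in_seq_eq (v : Int) (seqs : List (Int × Int)) :
    in_seq v seqs = (seqs.filter (fun p => decide (p.1 ≤ v ∧ v ≤ p.2))).map (fun _ => v) := by
  unfold in_seq; simpa using in_seq_foldl v seqs []

theorem in_seq_isEmpty (v : Int) (seqs : List (Int × Int)) :
    (!(in_seq v seqs).isEmpty) = seqs.any (fun p => decide (p.1 ≤ v ∧ v ≤ p.2)) := by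
  rw [in_seq_eq]
  induction seqs with
  | nil => rfl
  | cons h t ih =>
    rw [List.any_cons, List.filter_cons]
    by_cases hp : (h.1 ≤ v ∧ v ≤ h.2)
    · simp [hp]
    · simpa [hp] using ih

theorem flatMap_congr_mem {α β : Type} (l : List α) (f g : α → List β)
    (h : ∀ x ∈ l, f x = g x) : l.flatMap f = l.flatMap g := by
  induction l with
  | nil => rfl
  | cons a t ih =>
    simp only [List.flatMap_cons]
    rw [h a (by simp), ih (fun x hx => h x (by simp [hx]))]

-- iterating the filtered key list and looking each key up is a flatMap over the pairs
theorem flatMap_filter_keys (cols : List (Int × List (Int × Int)))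
    (hnd : (cols.map Prod.fst).Nodup) (p : Int → Bool)
    (q : Int → List (Int × Int) → List (Int × Int)) :
    ((cols.map Prod.fst).filter p).flatMap (fun x => q x (((PySem.Dict.mk cols).get? x).getD [])) =
      cols.flatMap (fun c => if p c.1 then q c.1 c.2 else []) := by
  induction cols with
  | nil => rfl
  | cons c t ih =>
    obtain ⟨k, v⟩ := c
    simp only [List.map_cons, List.nodup_cons] at hnd
    have htail : ((t.map Prod.fst).filter p).flatMap
        (fun x => q x (((PySem.Dict.mk ((k, v) :: t)).get? x).getD [])) =
        ((t.map Prod.fst).filter p).flatMap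
        (fun x => q x (((PySem.Dict.mk t).get? x).getD [])) := by
      apply flatMap_congr_mem
      intro x hx
      have hxm : x ∈ t.map Prod.fst := List.mem_of_mem_filter hx
      have hkx : (k == x) = false := by
        simp only [beq_eq_false_iff_ne]
        intro hkx; exact hnd.1 (hkx ▸ hxm)
      rw [PySem.Dict.get?_mk_cons, hkx]
      simp
    simp only [List.map_cons, List.flatMap_cons]
    by_cases hp : p k = true
    · rw [List.filter_cons_of_pos hp, List.flatMap_cons, htail, ih hnd.2,
        PySem.Dict.get?_mk_cons]
      simp [hp]
    · rw [List.filter_cons_of_neg hp, htail, ih hnd.2, if_neg hp]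
      simp

-- characterisation of port A as a per-row flatMap
theorem find_intercepts_eq (rows cols : List (Int × List (Int × Int)))
    (hnd : (cols.map Prod.fst).Nodup) :
    find_intercepts rows cols =
      rows.flatMap (fun r => cols.flatMap (pvContrib r.1 r.2)) := by
  have hrow : ∀ (r : Int × List (Int × Int)) (acc : List (Int × Int)),
      (((cols.map Prod.fst).filter (fun x => !(in_seq x r.2).isEmpty)).foldl
        (fun acc x => acc ++ (in_seq r.1 (((PySem.Dict.mk cols).get? x).getD [])).map (fun v => (x, v))) acc) =
      acc ++ cols.flatMap (pvContrib r.1 r.2) := by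
    intro r acc
    rw [PySem.List.foldl_append_eq_flatMap]
    congr 1
    rw [flatMap_filter_keys cols hnd (fun x => !(in_seq x r.2).isEmpty)
        (fun x seqs => (in_seq r.1 seqs).map (fun v => (x, v)))]
    apply flatMap_congr_mem
    intro c _
    rw [in_seq_isEmpty, in_seq_eq]
    unfold pvContrib
    by_cases h : r.2.any (fun p => decide (p.1 ≤ c.1 ∧ c.1 ≤ p.2)) = true
    · rw [if_pos h, if_pos h, List.map_map]; rfl
    · rw [if_neg h, if_neg h]
  unfold find_intercepts
  simp only [hrow]
  rw [PySem.List.foldl_append_eq_flatMap]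
  simp

-- ===== B-side lemmas =====

-- binary search on a sorted list counts the elements below the needle
theorem pvBl_count (xs : List Int) (v : Int) (hs : xs.Pairwise (· ≤ ·)) :
    pvBl xs v = xs.countP (fun x => decide (x < v)) := by
  induction xs using pvBl.induct v with
  | case1 => simp [pvBl]
  | case2 xs h hlt ih =>
    have hm : xs.length / 2 < xs.length := by
      have : xs.length ≠ 0 := fun hn => h (List.eq_nil_of_length_eq_zero hn)
      omega
    have hx0 : xs.getD (xs.length / 2) 0 = xs[xs.length / 2] := List.getD_eq_getElem xs 0 hm
    rw [hx0] at hlt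
    rw [pvBl, dif_neg h, if_pos (hx0 ▸ hlt)]
    rw [ih (hs.sublist (List.drop_sublist _ _))]
    conv_rhs => rw [← List.take_append_drop (xs.length / 2 + 1) xs]
    rw [List.countP_append]
    have hpg := List.pairwise_iff_getElem.mp hs
    have htake : (xs.take (xs.length / 2 + 1)).countP (fun x => decide (x < v)) = xs.length / 2 + 1 := by
      rw [List.countP_eq_length_filter, List.filter_eq_self.mpr, List.length_take]
      · omega
      · intro x hx
        rw [List.mem_take_iff_getElem] at hx
        obtain ⟨j, hj, rfl⟩ := hx
        simp only [decide_eq_true_iff]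
        rcases Nat.lt_or_ge j (xs.length / 2) with hjm | hjm
        · exact lt_of_le_of_lt (hpg j (xs.length / 2) (by omega) hm hjm) hlt
        · have hje : j = xs.length / 2 := by omega
          subst hje; exact hlt
    have hfix : List.countP (fun x => decide (x < v)) (List.drop (xs.length / 2 + 1) xs)
        = (xs.drop (xs.length / 2 + 1)).countP (fun x => decide (x < v)) := rfl
    omega
  | case3 xs h hge ih =>
    have hm : xs.length / 2 < xs.length := by
      have : xs.length ≠ 0 := fun hn => h (List.eq_nil_of_length_eq_zero hn)
      omega
    have hx0 : xs.getD (xs.length / 2) 0 = xs[xs.length / 2] := List.getD_eq_getElem xs 0 hm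
    rw [pvBl, dif_neg h, if_neg hge]
    rw [hx0] at hge
    rw [ih (hs.sublist (List.take_sublist _ _))]
    conv_rhs => rw [← List.take_append_drop (xs.length / 2) xs]
    rw [List.countP_append]
    have hpg := List.pairwise_iff_getElem.mp hs
    have hdrop : (xs.drop (xs.length / 2)).countP (fun x => decide (x < v)) = 0 := by
      rw [List.countP_eq_zero]
      intro x hx
      rw [List.mem_drop_iff_getElem] at hx
      obtain ⟨j, hj, rfl⟩ := hx
      simp only [decide_eq_true_iff, not_lt]
      have hvm : v ≤ xs[xs.length / 2] := not_lt.mp hge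
      rcases Nat.eq_zero_or_pos j with hj0 | hjp
      · subst hj0; simpa using hvm
      · exact le_trans hvm (hpg (xs.length / 2) (xs.length / 2 + j) hm (by omega) (by omega))
    omega

theorem pvBr_count (xs : List Int) (v : Int) (hs : xs.Pairwise (· ≤ ·)) :
    pvBr xs v = xs.countP (fun x => decide (x ≤ v)) := by
  induction xs using pvBr.induct v with
  | case1 => simp [pvBr]
  | case2 xs h hlt ih =>
    have hm : xs.length / 2 < xs.length := by
      have : xs.length ≠ 0 := fun hn => h (List.eq_nil_of_length_eq_zero hn)
      omega
    have hx0 : xs.getD (xs.length / 2) 0 = xs[xs.length / 2] := List.getD_eq_getElem xs 0 hm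
    rw [hx0] at hlt
    rw [pvBr, dif_neg h, if_pos (hx0 ▸ hlt)]
    rw [ih (hs.sublist (List.drop_sublist _ _))]
    conv_rhs => rw [← List.take_append_drop (xs.length / 2 + 1) xs]
    rw [List.countP_append]
    have hpg := List.pairwise_iff_getElem.mp hs
    have htake : (xs.take (xs.length / 2 + 1)).countP (fun x => decide (x ≤ v)) = xs.length / 2 + 1 := by
      rw [List.countP_eq_length_filter, List.filter_eq_self.mpr, List.length_take]
      · omega
      · intro x hx
        rw [List.mem_take_iff_getElem] at hx
        obtain ⟨j, hj, rfl⟩ := hx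
        simp only [decide_eq_true_iff]
        rcases Nat.lt_or_ge j (xs.length / 2) with hjm | hjm
        · exact le_trans (hpg j (xs.length / 2) (by omega) hm hjm) hlt
        · have hje : j = xs.length / 2 := by omega
          subst hje; exact hlt
    have hfix : List.countP (fun x => decide (x ≤ v)) (List.drop (xs.length / 2 + 1) xs)
        = (xs.drop (xs.length / 2 + 1)).countP (fun x => decide (x ≤ v)) := rfl
    omega
  | case3 xs h hge ih =>
    have hm : xs.length / 2 < xs.length := by
      have : xs.length ≠ 0 := fun hn => h (List.eq_nil_of_length_eq_zero hn)
      omega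
    have hx0 : xs.getD (xs.length / 2) 0 = xs[xs.length / 2] := List.getD_eq_getElem xs 0 hm
    rw [pvBr, dif_neg h, if_neg hge]
    rw [hx0] at hge
    rw [ih (hs.sublist (List.take_sublist _ _))]
    conv_rhs => rw [← List.take_append_drop (xs.length / 2) xs]
    rw [List.countP_append]
    have hpg := List.pairwise_iff_getElem.mp hs
    have hdrop : (xs.drop (xs.length / 2)).countP (fun x => decide (x ≤ v)) = 0 := by
      rw [List.countP_eq_zero]
      intro x hx
      rw [List.mem_drop_iff_getElem] at hx
      obtain ⟨j, hj, rfl⟩ := hx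
      simp only [decide_eq_true_iff, not_le]
      have hvm : v < xs[xs.length / 2] := not_le.mp hge
      rcases Nat.eq_zero_or_pos j with hj0 | hjp
      · subst hj0; simpa using hvm
      · exact lt_of_lt_of_le hvm (hpg (xs.length / 2) (xs.length / 2 + j) hm (by omega) (by omega))
    omega

-- on a list sorted by first component, dropping the count of keys < a keeps exactly the keys ≥ a
theorem sorted_drop_countP (l : List (Int × Int)) (a : Int)
    (hs : l.Pairwise (fun s t => s.1 ≤ t.1)) :
    l.drop (l.countP (fun t => decide (t.1 < a))) = l.filter (fun t => decide (a ≤ t.1)) := by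
  induction l with
  | nil => simp
  | cons x t ih =>
    rw [List.pairwise_cons] at hs
    by_cases hx : x.1 < a
    · rw [List.countP_cons_of_pos (by simpa using hx)]
      rw [List.filter_cons_of_neg (by simpa using hx)]
      simpa using ih hs.2
    · have hax : a ≤ x.1 := not_lt.mp hx
      have hc0 : t.countP (fun s => decide (s.1 < a)) = 0 := by
        rw [List.countP_eq_zero]
        intro y hy
        simpa using not_lt.mpr (le_trans hax (hs.1 y hy))
      rw [List.countP_cons_of_neg (by simpa using hx), hc0]
      rw [List.filter_cons_of_pos (by simpa using hax), List.drop_zero]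
      rw [List.filter_eq_self.mpr]
      intro y hy
      simpa using le_trans hax (hs.1 y hy)

-- taking the count of keys ≤ b keeps exactly the keys ≤ b
theorem sorted_take_countP (l : List (Int × Int)) (b : Int)
    (hs : l.Pairwise (fun s t => s.1 ≤ t.1)) :
    l.take (l.countP (fun t => decide (t.1 ≤ b))) = l.filter (fun t => decide (t.1 ≤ b)) := by
  induction l with
  | nil => simp
  | cons x t ih =>
    rw [List.pairwise_cons] at hs
    by_cases hx : x.1 ≤ b
    · rw [List.countP_cons_of_pos (by simpa using hx)]
      rw [List.filter_cons_of_pos (by simpa using hx), List.take_succ_cons]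
      rw [ih hs.2]
    · have hc0 : t.countP (fun s => decide (s.1 ≤ b)) = 0 := by
        rw [List.countP_eq_zero]
        intro y hy
        have : b < y.1 := lt_of_lt_of_le (not_le.mp hx) (hs.1 y hy)
        simpa using not_le.mpr this
      rw [List.countP_cons_of_neg (by simpa using hx), hc0]
      rw [List.filter_cons_of_neg (by simpa using hx), List.take_zero]
      rw [List.filter_eq_nil_iff.mpr]
      intro y hy
      have : b < y.1 := lt_of_lt_of_le (not_le.mp hx) (hs.1 y hy)
      simpa using not_le.mpr this

theorem countP_split (l : List (Int × Int)) (a b : Int) (hab : a ≤ b) :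
    l.countP (fun t => decide (t.1 ≤ b)) =
      l.countP (fun t => decide (t.1 < a)) + l.countP (fun t => decide (a ≤ t.1 ∧ t.1 ≤ b)) := by
  induction l with
  | nil => simp
  | cons x t ih =>
    simp only [List.countP_cons, ih]
    by_cases h1 : x.1 < a <;> by_cases h2 : x.1 ≤ b
    · rw [if_pos (show (decide (x.1 ≤ b)) = true by simpa using h2),
        if_pos (show (decide (x.1 < a)) = true by simpa using h1),
        if_neg (show ¬ (decide (a ≤ x.1 ∧ x.1 ≤ b)) = true by simp; omega)]
      omega
    · exact absurd (le_trans (le_of_lt h1) hab) h2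
    · rw [if_pos (show (decide (x.1 ≤ b)) = true by simpa using h2),
        if_neg (show ¬ (decide (x.1 < a)) = true by simpa using h1),
        if_pos (show (decide (a ≤ x.1 ∧ x.1 ≤ b)) = true by simp; omega)]
      omega
    · rw [if_neg (show ¬ (decide (x.1 ≤ b)) = true by simpa using h2),
        if_neg (show ¬ (decide (x.1 < a)) = true by simpa using h1),
        if_neg (show ¬ (decide (a ≤ x.1 ∧ x.1 ≤ b)) = true by simp; omega)]
      omega

-- the slice between the two binary-search bounds is the interval filter
theorem slice_bl_br (pairs : List (Int × Int)) (a b : Int)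
    (hs : pairs.Pairwise (fun s t => s.1 ≤ t.1)) :
    PySem.List.slice pairs (some ((pvBl (pairs.map (fun t => t.1)) a : Nat) : Int))
        (some ((pvBr (pairs.map (fun t => t.1)) b : Nat) : Int)) =
      pairs.filter (fun t => decide (a ≤ t.1 ∧ t.1 ≤ b)) := by
  have hmap : (pairs.map (fun t => t.1)).Pairwise (· ≤ ·) := List.pairwise_map.mpr hs
  have hbl : pvBl (pairs.map (fun t => t.1)) a = pairs.countP (fun t => decide (t.1 < a)) := by
    rw [pvBl_count _ _ hmap, List.countP_map]; rfl
  have hbr : pvBr (pairs.map (fun t => t.1)) b = pairs.countP (fun t => decide (t.1 ≤ b)) := by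
    rw [pvBr_count _ _ hmap, List.countP_map]; rfl
  rw [hbl, hbr, PySem.List.slice_natCast]
  by_cases hab : a ≤ b
  · rw [countP_split pairs a b hab, Nat.add_sub_cancel_left, sorted_drop_countP pairs a hs]
    have hs2 : (pairs.filter (fun t => decide (a ≤ t.1))).Pairwise (fun s t => s.1 ≤ t.1) :=
      hs.sublist List.filter_sublist
    have hcnt : (pairs.filter (fun t => decide (a ≤ t.1))).countP (fun t => decide (t.1 ≤ b)) =
        pairs.countP (fun t => decide (a ≤ t.1 ∧ t.1 ≤ b)) := by
      rw [List.countP_filter]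
      apply List.countP_congr
      intro x _
      simp [and_comm]
    rw [← hcnt, sorted_take_countP _ b hs2, List.filter_filter]
    apply List.filter_congr
    intro x _
    rw [Bool.and_comm]
    simp
  · have hle : pairs.countP (fun t => decide (t.1 ≤ b)) ≤ pairs.countP (fun t => decide (t.1 < a)) := by
      apply List.countP_mono_left
      intro x _ hx
      simp only [decide_eq_true_eq] at *
      omega
    rw [Nat.sub_eq_zero_of_le hle, List.take_zero]
    rw [eq_comm, List.filter_eq_nil_iff]
    intro x _
    simp only [decide_eq_true_eq]
    omega

theorem mem_hit_fold (x_seqs : List (Int × Int)) (g : Int × Int → List (Int × Int))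
    (s0 : PySem.Set Int) (i : Int) :
    i ∈ x_seqs.foldl (fun s p => (g p).foldl (fun s t => PySem.Set.add s t.2) s) s0 ↔
      i ∈ s0 ∨ ∃ p ∈ x_seqs, ∃ t ∈ g p, t.2 = i := by
  induction x_seqs generalizing s0 with
  | nil => simp
  | cons p ps ih =>
    rw [List.foldl_cons, ih]
    have hinner : ∀ (l : List (Int × Int)) (s : PySem.Set Int),
        i ∈ l.foldl (fun s t => PySem.Set.add s t.2) s ↔ i ∈ s ∨ ∃ t ∈ l, t.2 = i := by
      intro l
      induction l with
      | nil => simp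
      | cons t ts ihl =>
        intro s
        rw [List.foldl_cons, ihl]
        rw [PySem.Set.mem_add]
        constructor
        · rintro (⟨h | h⟩ | h)
          · exact Or.inl h
          · exact Or.inr ⟨t, by simp, h.symm⟩
          · obtain ⟨u, hu, he⟩ := h
            exact Or.inr ⟨u, by simp [hu], he⟩
        · rintro (h | ⟨u, hu, he⟩)
          · exact Or.inl (Or.inl h)
          · rcases List.mem_cons.mp hu with rfl | hu'
            · exact Or.inl (Or.inr he.symm)
            · exact Or.inr ⟨u, hu', he⟩
    rw [hinner]
    constructor
    · rintro (⟨h | ⟨t, ht, he⟩⟩ | ⟨q, hq, ht⟩)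
      · exact Or.inl h
      · exact Or.inr ⟨p, by simp, t, ht, he⟩
      · exact Or.inr ⟨q, by simp [hq], ht⟩
    · rintro (h | ⟨q, hq, t, ht, he⟩)
      · exact Or.inl (Or.inl h)
      · rcases List.mem_cons.mp hq with rfl | hq'
        · exact Or.inl (Or.inr ⟨t, ht, he⟩)
        · exact Or.inr ⟨q, hq', t, ht, he⟩

theorem nodup_hit_fold (x_seqs : List (Int × Int)) (g : Int × Int → List (Int × Int))
    (s0 : PySem.Set Int) (h : s0.Nodup) :
    (x_seqs.foldl (fun s p => (g p).foldl (fun s t => PySem.Set.add s t.2) s) s0).Nodup := by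
  induction x_seqs generalizing s0 with
  | nil => exact h
  | cons p ps ih =>
    rw [List.foldl_cons]
    apply ih
    clear ih
    induction g p generalizing s0 with
    | nil => exact h
    | cons t ts ihl => exact ihl _ (PySem.Set.nodup_add _ _ h)

theorem flatMap_filter {α β : Type} (l : List α) (p : α → Bool) (f : α → List β) :
    (l.filter p).flatMap f = l.flatMap (fun x => if p x then f x else []) := by
  induction l with
  | nil => rfl
  | cons x t ih =>
    rw [List.filter_cons]
    by_cases hx : p x
    · simp [hx, ih]
    · simp [hx, ih]

-- the row predicate: some interval of x_seqs contains the key of column i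
def pvPred (cols : List (Int × List (Int × Int))) (x_seqs : List (Int × Int)) (i : Int) : Bool :=
  x_seqs.any (fun p => decide (p.1 ≤ (PySem.List.pyGetD cols i (0, [])).1 ∧
    (PySem.List.pyGetD cols i (0, [])).1 ≤ p.2))

-- characterisation of port B as the same per-row flatMap
theorem find_intercepts_alt_eq (rows cols : List (Int × List (Int × Int))) :
    find_intercepts_alt rows cols =
      rows.flatMap (fun r => cols.flatMap (pvContrib r.1 r.2)) := by
  unfold find_intercepts_alt
  dsimp only
  refine Eq.trans (PySem.List.foldl_congr_mem rows _
    (fun out (r : Int × List (Int × Int)) => out ++ cols.flatMap (pvContrib r.1 r.2)) [] ?hrow) ?hrest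
  case hrest =>
    rw [PySem.List.foldl_append_eq_flatMap]
    simp
  case hrow =>
    intro out r _
    set pairs := PySem.List.sorted ((PySem.List.enumerate cols).map (fun t => (t.2.1, t.1)))
      (fun t => t.1) with hpairs_def
    have hpw : pairs.Pairwise (fun s t => s.1 ≤ t.1) := PySem.List.sorted_pairwise _ _
    have hmem_pairs : ∀ t : Int × Int,
        t ∈ pairs ↔ ∃ k : Nat, ∃ hk : k < cols.length, t = (cols[k].1, (k : Int)) := by
      intro t
      rw [hpairs_def, PySem.List.mem_sorted, List.mem_map]
      constructor
      · rintro ⟨e, he, rfl⟩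
        rw [PySem.List.mem_enumerate_iff] at he
        obtain ⟨k, hk, rfl⟩ := he
        exact ⟨k, hk, by simp⟩
      · rintro ⟨k, hk, rfl⟩
        refine ⟨((k : Int), cols[k]), ?_, by simp⟩
        rw [PySem.List.mem_enumerate_iff]
        exact ⟨k, hk, by simp⟩
    have hslice : ∀ p : Int × Int,
        PySem.List.slice pairs (some ((pvBl (pairs.map (fun t => t.1)) p.1 : Nat) : Int))
            (some ((pvBr (pairs.map (fun t => t.1)) p.2 : Nat) : Int)) =
          pairs.filter (fun t => decide (p.1 ≤ t.1 ∧ t.1 ≤ p.2)) :=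
      fun p => slice_bl_br pairs p.1 p.2 hpw
    have hhit_mem : ∀ i : Int,
        (i ∈ r.2.foldl (fun hit p =>
            (PySem.List.slice pairs (some ((pvBl (pairs.map (fun t => t.1)) p.1 : Nat) : Int))
              (some ((pvBr (pairs.map (fun t => t.1)) p.2 : Nat) : Int))).foldl
              (fun hit t => PySem.Set.add hit t.2) hit) PySem.Set.empty) ↔
          (0 ≤ i ∧ i < (cols.length : Int) ∧ pvPred cols r.2 i = true) := by
      intro i
      rw [mem_hit_fold]
      simp only [hslice]
      constructor
      · rintro (h | ⟨p, hp, t, ht, rfl⟩)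
        · simp [PySem.Set.empty] at h
        · rw [List.mem_filter] at ht
          obtain ⟨htp, hcond⟩ := ht
          rw [hmem_pairs] at htp
          obtain ⟨k, hk, rfl⟩ := htp
          simp only [decide_eq_true_eq] at hcond
          refine ⟨by simp, by simpa using (show ((k : Int)) < (cols.length : Int) by exact_mod_cast hk), ?_⟩
          unfold pvPred
          rw [List.any_eq_true]
          refine ⟨p, hp, ?_⟩
          rw [PySem.List.pyGetD_natCast, List.getD_eq_getElem cols (0, []) hk]
          simpa using hcond
      · rintro ⟨h0, hn, hpred⟩
        right
        unfold pvPred at hpred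
        rw [List.any_eq_true] at hpred
        obtain ⟨p, hp, hcond⟩ := hpred
        have hk : i.toNat < cols.length := by omega
        have hcast : ((i.toNat : Nat) : Int) = i := by omega
        rw [← hcast, PySem.List.pyGetD_natCast, List.getD_eq_getElem cols (0, []) hk] at hcond
        refine ⟨p, hp, (cols[i.toNat].1, (i.toNat : Int)), ?_, hcast⟩
        rw [List.mem_filter]
        exact ⟨(hmem_pairs _).mpr ⟨i.toNat, hk, rfl⟩, by simpa using hcond⟩
    rw [PySem.List.foldl_append_eq_flatMap]
    congr 1
    have hsorted : PySem.List.sorted (r.2.foldl (fun hit p =>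
        (PySem.List.slice pairs (some ((pvBl (pairs.map (fun t => t.1)) p.1 : Nat) : Int))
          (some ((pvBr (pairs.map (fun t => t.1)) p.2 : Nat) : Int))).foldl
          (fun hit t => PySem.Set.add hit t.2) hit) PySem.Set.empty) (fun i => i) =
        (PySem.List.pyRange 0 (cols.length : Int)).filter (pvPred cols r.2) := by
      apply PySem.List.sorted_eq_of_perm_of_pairwise_lt
      · refine (List.perm_ext_iff_of_nodup
          ((PySem.List.nodup_pyRange_one _ _).filter _)
          (nodup_hit_fold _ _ _ (by simp [PySem.Set.empty]))).mpr ?_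
        intro a
        rw [List.mem_filter, PySem.List.mem_pyRange_one, hhit_mem]
        tauto
      · exact (PySem.List.pairwise_lt_pyRange_one _ _).filter _
    rw [hsorted, flatMap_filter]
    rw [flatMap_congr_mem _ _
      (fun i => pvContrib r.1 r.2 (PySem.List.pyGetD cols i (0, []))) ?hpt]
    · rw [← List.flatMap_map (fun j => PySem.List.pyGetD cols j (0, [])) (pvContrib r.1 r.2),
        PySem.List.map_pyGetD_pyRange_zero']
    case hpt =>
      intro i _
      unfold pvContrib pvPred
      by_cases hc : (r.2.any (fun p => decide (p.1 ≤ (PySem.List.pyGetD cols i (0, [])).1 ∧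
          (PySem.List.pyGetD cols i (0, [])).1 ≤ p.2))) = true
      · rw [if_pos hc]
        rw [PySem.List.foldl_ite_add_one (fun q : Int × Int => q.1 ≤ r.1 ∧ r.1 ≤ q.2),
          PySem.List.pyRepeat_singleton]
        simp only [hc, if_true, List.map_const', List.countP_eq_length_filter]
        congr 1
        omega
      · rw [if_neg hc]
        beta_reduce
        rw [if_neg hc]

-- ===== VERDICT (by name: the statement is the Claim_ definition above) =====
theorem find_intercepts_spec : Claim_equal_find_intercepts := by
  intro rows cols _ hpre
  unfold Spec_find_intercepts
  rw [find_intercepts_eq rows cols hpre.2, find_intercepts_alt_eq]
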